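-- pv_equiv track=rewrite | github.com/kelliosli/tta | computing/services.py | to_points
-- ===== SOURCE A (Python) =====
-- def to_points(arr):
--     """convert ds moves array to array[point[[mpve],[move]]]"""
--     pointed = []
--     tmp = []
--     for i in arr:
--         if i[4]==False:
--             tmp.append(i)
--             pointed.append(tmp)
--             tmp = []
--         else:
--             tmp.append(i)
--     return pointed
-- ===== SOURCE B (Python) =====
-- def to_points(arr):
--     """convert ds moves array to array[point[[mpve],[move]]]"""
--     delims = [k for k, i in enumerate(arr) if i[4] == False]
--     pointed = []
--     start = 0
--     for idx in delims:
--         pointed.append(arr[start:idx + 1])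
--         start = idx + 1
--     return pointed
-- ===== Notes on version B (the rewrite author's own statement) =====
-- stated objective: alternative
-- what changed: B replaces A's single pass carrying a growing tmp buffer by a two-phase decomposition: first collect the indices of delimiter rows (row[4] == False), then cut the input into slices between consecutive delimiter indices.
import Mathlib
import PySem

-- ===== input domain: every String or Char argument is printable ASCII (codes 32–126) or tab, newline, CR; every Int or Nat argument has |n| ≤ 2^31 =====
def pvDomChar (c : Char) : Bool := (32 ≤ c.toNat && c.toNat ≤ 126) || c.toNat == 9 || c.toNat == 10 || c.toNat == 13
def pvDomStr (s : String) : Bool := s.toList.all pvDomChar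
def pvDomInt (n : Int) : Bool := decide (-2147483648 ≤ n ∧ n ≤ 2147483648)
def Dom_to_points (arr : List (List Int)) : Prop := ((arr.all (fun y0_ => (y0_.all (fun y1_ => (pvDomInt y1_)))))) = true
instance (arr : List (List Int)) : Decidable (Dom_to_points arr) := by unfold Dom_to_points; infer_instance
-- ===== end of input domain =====

-- B groups rows into points by delimiter rows (row[4] == False, i.e. row[4] == 0) via a
-- two-phase decomposition (collect delimiter indices, then slice) instead of A's one pass
-- with a carried tmp buffer; same cost, different structure.

-- ===== PORT A =====
-- loop body of A's for-loop (i[4] == False is i[4] == 0 on int rows; pyGetD is exact under Pre_)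
def pvStepA (st : List (List (List Int)) × List (List Int)) (i : List Int) :
    List (List (List Int)) × List (List Int) :=
  if PySem.List.pyGetD i 4 1 = 0 then (st.1 ++ [st.2 ++ [i]], [])
  else (st.1, st.2 ++ [i])

def to_points (arr : List (List Int)) : List (List (List Int)) :=
  (arr.foldl pvStepA ([], [])).1

-- ===== PORT B =====
-- delims = [k for k, i in enumerate(arr) if i[4] == False]
def pvDelims (arr : List (List Int)) : List Int :=
  ((PySem.List.enumerate arr 0).filter (fun p => PySem.List.pyGetD p.2 4 1 == 0)).map (·.1)

-- loop body of B's for-loop: pointed.append(arr[start:idx+1]); start = idx+1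
def pvStepB (arr : List (List Int)) (st : List (List (List Int)) × Int) (idx : Int) :
    List (List (List Int)) × Int :=
  (st.1 ++ [PySem.List.slice arr (some st.2) (some (idx + 1))], idx + 1)

def to_points_alt (arr : List (List Int)) : List (List (List Int)) :=
  ((pvDelims arr).foldl (pvStepB arr) ([], 0)).1

-- ===== PRECONDITION & SPEC =====
-- Pre_ excludes exactly the inputs on which Python A raises IndexError: a row shorter than 5.
def Pre_to_points (arr : List (List Int)) : Prop := ∀ i ∈ arr, 5 ≤ i.length
instance (arr : List (List Int)) : Decidable (Pre_to_points arr) := by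
  unfold Pre_to_points; infer_instance

def pvWitness_to_points : List (List Int) := [[0, 0, 0, 0, 1], [0, 0, 0, 0, 0]]

def Spec_to_points (arr : List (List Int)) (out : List (List (List Int))) : Prop := out = to_points_alt arr
instance (arr : List (List Int)) (out : List (List (List Int))) : Decidable (Spec_to_points arr out) := by unfold Spec_to_points; infer_instance

-- ===== CLAIM (what is proved, stated in full; the proofs are below) =====
def Claim_equal_to_points : Prop := ∀ (arr : List (List Int)), Dom_to_points arr → Pre_to_points arr → Spec_to_points arr (to_points arr)

-- ===== LEMMAS AND PROOFS =====

-- A's accumulator only grows: the already-produced points prefix factors out.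
theorem foldA_acc (xs : List (List Int)) :
    ∀ (p : List (List (List Int))) (t : List (List Int)),
      (xs.foldl pvStepA (p, t)).1 = p ++ (xs.foldl pvStepA ([], t)).1 := by
  induction xs with
  | nil => intro p t; simp
  | cons x xs ih =>
    intro p t
    simp only [List.foldl_cons, pvStepA]
    split_ifs with h
    · rw [ih (p ++ [t ++ [x]]), ih ([] ++ [t ++ [x]])]; simp
    · exact ih p (t ++ [x])

-- no delimiter in xs: tmp just accumulates.
theorem foldA_nodelim (xs : List (List Int))
    (h : ∀ i ∈ xs, ¬ PySem.List.pyGetD i 4 1 = 0) :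
    ∀ (p : List (List (List Int))) (t : List (List Int)),
      xs.foldl pvStepA (p, t) = (p, t ++ xs) := by
  induction xs with
  | nil => intro p t; simp
  | cons x xs ih =>
    intro p t
    have hx := h x (by simp)
    simp only [List.foldl_cons, pvStepA, if_neg hx]
    rw [ih (fun i hi => h i (by simp [hi])) p (t ++ [x])]
    simp

theorem A_split (pre : List (List Int)) (d : List Int) (rest : List (List Int))
    (hpre : ∀ i ∈ pre, ¬ PySem.List.pyGetD i 4 1 = 0)
    (hd : PySem.List.pyGetD d 4 1 = 0) :
    to_points (pre ++ d :: rest) = (pre ++ [d]) :: to_points rest := by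
  unfold to_points
  rw [List.foldl_append, foldA_nodelim pre hpre, List.foldl_cons]
  simp only [pvStepA, if_pos hd, List.nil_append]
  rw [foldA_acc]
  simp

theorem A_nodelim (arr : List (List Int))
    (h : ∀ i ∈ arr, ¬ PySem.List.pyGetD i 4 1 = 0) : to_points arr = [] := by
  unfold to_points
  rw [foldA_nodelim arr h [] []]

-- enumeration from s is the enumeration from 0 with every index shifted by s.
theorem enumerate_shift (xs : List (List Int)) :
    ∀ (s : Int), PySem.List.enumerate xs s
      = (PySem.List.enumerate xs 0).map (fun p => (p.1 + s, p.2)) := by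
  induction xs with
  | nil => intro s; simp [PySem.List.enumerate_nil]
  | cons x xs ih =>
    intro s
    rw [PySem.List.enumerate_cons, PySem.List.enumerate_cons, ih (s + 1), List.map_cons,
      ih (0 + 1), List.map_map]
    simp only [zero_add]
    congr 1
    apply List.map_congr_left
    intro p _
    simp only [Function.comp, Prod.mk.injEq, and_true]
    omega

theorem delims_shift (xs : List (List Int)) (s : Int) :
    ((PySem.List.enumerate xs s).filter (fun p => PySem.List.pyGetD p.2 4 1 == 0)).map (·.1)
      = (((PySem.List.enumerate xs 0).filter (fun p => PySem.List.pyGetD p.2 4 1 == 0)).map (·.1)).map (· + s) := by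
  rw [enumerate_shift xs s, List.filter_map, List.map_map, List.map_map]
  rfl

theorem pvDelims_nonneg (arr : List (List Int)) : ∀ k ∈ pvDelims arr, 0 ≤ k := by
  intro k hk
  unfold pvDelims at hk
  simp only [List.mem_map, List.mem_filter] at hk
  obtain ⟨p, ⟨hp, _⟩, rfl⟩ := hk
  rw [PySem.List.mem_enumerate_iff] at hp
  obtain ⟨j, hj, rfl⟩ := hp
  simp

theorem pvDelims_split (pre : List (List Int)) (d : List Int) (rest : List (List Int))
    (hpre : ∀ i ∈ pre, ¬ PySem.List.pyGetD i 4 1 = 0)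
    (hd : PySem.List.pyGetD d 4 1 = 0) :
    pvDelims (pre ++ d :: rest)
      = (pre.length : Int) :: (pvDelims rest).map (· + ((pre.length : Int) + 1)) := by
  unfold pvDelims
  rw [PySem.List.enumerate_append, List.filter_append, List.map_append]
  have h1 : (PySem.List.enumerate pre 0).filter (fun p => PySem.List.pyGetD p.2 4 1 == 0) = [] := by
    apply List.filter_eq_nil_iff.mpr
    intro p hp
    rw [PySem.List.mem_enumerate_iff] at hp
    obtain ⟨j, hj, rfl⟩ := hp
    simpa using hpre _ (List.getElem_mem hj)
  rw [h1, PySem.List.enumerate_cons, List.filter_cons]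
  simp only [hd, beq_self_eq_true, if_pos, List.map_cons, List.map_nil, List.nil_append, zero_add]
  rw [delims_shift rest ((pre.length : Int) + 1)]

-- B's accumulator only grows too.
theorem foldB_acc (arr : List (List Int)) (ds : List Int) :
    ∀ (p : List (List (List Int))) (c : Int),
      (ds.foldl (pvStepB arr) (p, c)).1 = p ++ (ds.foldl (pvStepB arr) ([], c)).1 := by
  induction ds with
  | nil => intro p c; simp
  | cons k ds ih =>
    intro p c
    simp only [List.foldl_cons, pvStepB]
    rw [ih (p ++ _), ih ([] ++ _)]
    simp

-- slicing arr at indices shifted by m is slicing arr.drop m.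
theorem slice_drop (arr : List (List Int)) (m : Nat) (c k : Int) (hc : 0 ≤ c) (hk : 0 ≤ k) :
    PySem.List.slice arr (some (c + (m : Int))) (some (k + (m : Int) + 1))
      = PySem.List.slice (arr.drop m) (some c) (some (k + 1)) := by
  rw [PySem.List.slice_toNat _ (by omega) (by omega),
    PySem.List.slice_toNat _ (by omega) (by omega), List.drop_drop]
  have e2 : (k + (m : Int) + 1).toNat - (c + (m : Int)).toNat = (k + 1).toNat - c.toNat := by omega
  have e1 : (c + (m : Int)).toNat = m + c.toNat := by omega
  rw [e2, e1]

theorem foldB_shift (arr : List (List Int)) (m : Nat) (ds : List Int) :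
    ∀ (c : Int) (p : List (List (List Int))), 0 ≤ c → (∀ k ∈ ds, 0 ≤ k) →
      ((ds.map (· + (m : Int))).foldl (pvStepB arr) (p, c + (m : Int))).1
        = (ds.foldl (pvStepB (arr.drop m)) (p, c)).1 := by
  induction ds with
  | nil => intro c p _ _; simp
  | cons k ds ih =>
    intro c p hc hks
    have hk : 0 ≤ k := hks k (by simp)
    simp only [List.map_cons, List.foldl_cons, pvStepB]
    rw [slice_drop arr m c k hc hk]
    have h1 : k + (m : Int) + 1 = (k + 1) + (m : Int) := by omega
    rw [h1, ih (k + 1) _ (by omega) (fun a ha => hks a (by simp [ha]))]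

theorem foldB_shift0 (arr : List (List Int)) (m : Nat) (ds : List Int)
    (p : List (List (List Int))) (h : ∀ k ∈ ds, 0 ≤ k) :
    ((ds.map (· + (m : Int))).foldl (pvStepB arr) (p, (m : Int))).1
      = (ds.foldl (pvStepB (arr.drop m)) (p, 0)).1 := by
  have := foldB_shift arr m ds 0 p (by omega) h
  simpa using this

theorem B_split (pre : List (List Int)) (d : List Int) (rest : List (List Int))
    (hpre : ∀ i ∈ pre, ¬ PySem.List.pyGetD i 4 1 = 0)
    (hd : PySem.List.pyGetD d 4 1 = 0) :
    to_points_alt (pre ++ d :: rest) = (pre ++ [d]) :: to_points_alt rest := by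
  unfold to_points_alt
  rw [pvDelims_split pre d rest hpre hd, List.foldl_cons]
  simp only [pvStepB]
  have hslice : PySem.List.slice (pre ++ d :: rest) (some 0) (some ((pre.length : Int) + 1))
      = pre ++ [d] := by
    rw [PySem.List.slice_toNat _ (by omega) (by omega)]
    have h2 : ((pre.length : Int) + 1).toNat = pre.length + 1 := by omega
    have h3 : pre.length + 1 - pre.length = 1 := by omega
    simp only [h2, Int.toNat_zero, List.drop_zero, Nat.sub_zero]
    rw [List.take_append, List.take_of_length_le (by omega), h3]
    simp
  rw [hslice, foldB_acc]
  have hcast : (pre.length : Int) + 1 = ((pre.length + 1 : Nat) : Int) := by push_cast; ring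
  rw [hcast, foldB_shift0 (pre ++ d :: rest) (pre.length + 1) (pvDelims rest) []
        (pvDelims_nonneg rest)]
  have hdrop : (pre ++ d :: rest).drop (pre.length + 1) = rest := by
    simp [List.drop_append]
  rw [hdrop]
  simp

theorem B_nodelim (arr : List (List Int))
    (h : ∀ i ∈ arr, ¬ PySem.List.pyGetD i 4 1 = 0) : to_points_alt arr = [] := by
  unfold to_points_alt
  have hnil : pvDelims arr = [] := by
    unfold pvDelims
    rw [List.filter_eq_nil_iff.mpr, List.map_nil]
    intro p hp
    rw [PySem.List.mem_enumerate_iff] at hp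
    obtain ⟨j, hj, rfl⟩ := hp
    simpa using h _ (List.getElem_mem hj)
  rw [hnil]; simp

theorem key : ∀ (n : Nat) (arr : List (List Int)), arr.length ≤ n →
    to_points arr = to_points_alt arr := by
  intro n
  induction n with
  | zero =>
    intro arr h
    have : arr = [] := List.eq_nil_of_length_eq_zero (by omega)
    subst this; rfl
  | succ n ih =>
    intro arr hlen
    set q : List Int → Bool := fun i => !(PySem.List.pyGetD i 4 1 == 0) with hq
    cases hdw : arr.dropWhile q with
    | nil =>
      have hall : ∀ i ∈ arr, ¬ PySem.List.pyGetD i 4 1 = 0 := by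
        intro i hi
        have harr : arr = arr.takeWhile q := by
          conv_lhs => rw [← List.takeWhile_append_dropWhile (p := q) (l := arr)]
          rw [hdw, List.append_nil]
        rw [harr] at hi
        have := List.mem_takeWhile_imp hi
        simpa [hq] using this
      rw [A_nodelim arr hall, B_nodelim arr hall]
    | cons d rest =>
      have harr : arr = arr.takeWhile q ++ d :: rest := by
        conv_lhs => rw [← List.takeWhile_append_dropWhile (p := q) (l := arr)]
        rw [hdw]
      have hpre : ∀ i ∈ arr.takeWhile q, ¬ PySem.List.pyGetD i 4 1 = 0 := by
        intro i hi
        have := List.mem_takeWhile_imp hi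
        simpa [hq] using this
      have hd : PySem.List.pyGetD d 4 1 = 0 := by
        have := List.head_dropWhile_not (p := q) (l := arr)
        rw [hdw] at this
        simpa [hq] using this (by simp)
      have hrest : rest.length ≤ n := by
        have := congrArg List.length harr
        simp at this
        omega
      rw [harr, A_split _ d rest hpre hd, B_split _ d rest hpre hd, ih rest hrest]

-- ===== VERDICT (by name: the statement is the Claim_ definition above) =====
theorem to_points_spec : Claim_equal_to_points := by
  intro arr _ _
  unfold Spec_to_points
  exact key arr.length arr (le_refl _)
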